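-- pv_equiv track=rewrite | github.com/ninjapapa/SMV2 | src/main/python/smv/helpers.py | _mkUniq
-- ===== SOURCE A (Python) =====
-- def _mkUniq(collection, candidate, ignorcase = False, postfix = None):
--     """
--     Repeatedly changes `candidate` so that it is not found in the `collection`.
--     Useful when choosing a unique column name to add to a data frame.
--     """
--     if ignorcase:
--         col_cmp = [i.lower() for i in collection]
--         can_cmp = candidate.lower()
--     else:
--         col_cmp = collection
--         can_cmp = candidate
--
--     can_to = "_" + can_cmp if postfix is None else can_cmp + postfix
--     if can_to in col_cmp:
--         res = _mkUniq(col_cmp, can_to, ignorcase, postfix)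
--     else:
--         res = can_to
--
--     return res
-- ===== SOURCE B (Python) =====
-- def _mkUniq(collection, candidate, ignorcase = False, postfix = None):
--     """Iterative version: lower the comparison data once, then extend the
--     candidate in a while loop until it is absent from the collection."""
--     if ignorcase:
--         col_cmp = [i.lower() for i in collection]
--         can_cmp = candidate.lower()
--     else:
--         col_cmp = collection
--         can_cmp = candidate
--     can_to = "_" + can_cmp if postfix is None else can_cmp + postfix
--     while can_to in col_cmp:
--         can_cmp = can_to.lower() if ignorcase else can_to
--         can_to = "_" + can_cmp if postfix is None else can_cmp + postfix
--     return can_to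
-- ===== Notes on version B (the rewrite author's own statement) =====
-- stated objective: simpler
-- what changed: Replaces A's tail recursion (which re-lowers the whole collection at every level) with a single pre-lowered comparison collection and a while loop that extends the candidate until it is unique.
import Mathlib
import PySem

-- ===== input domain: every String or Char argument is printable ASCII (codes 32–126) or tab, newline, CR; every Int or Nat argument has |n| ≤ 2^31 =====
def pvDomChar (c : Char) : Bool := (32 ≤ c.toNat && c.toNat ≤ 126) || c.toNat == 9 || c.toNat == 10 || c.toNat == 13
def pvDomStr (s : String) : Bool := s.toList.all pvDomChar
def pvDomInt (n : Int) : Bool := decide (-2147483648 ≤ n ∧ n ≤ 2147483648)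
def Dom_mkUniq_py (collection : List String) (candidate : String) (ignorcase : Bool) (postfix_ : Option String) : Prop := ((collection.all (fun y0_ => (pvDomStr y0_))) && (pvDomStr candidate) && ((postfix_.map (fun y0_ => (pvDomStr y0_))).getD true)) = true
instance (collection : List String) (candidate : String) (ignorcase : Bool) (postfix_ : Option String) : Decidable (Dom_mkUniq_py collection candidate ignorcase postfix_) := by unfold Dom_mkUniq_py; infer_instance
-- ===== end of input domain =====

-- B replaces A's tail recursion by a single while loop over the pre-lowered collection; equivalence is proved for the return value.
-- ===== PORT A =====
-- Literal port of A's recursion; the fuel argument only makes the (possibly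
-- non-terminating) Python recursion total — inside Pre_ it is never exhausted,
-- since each recursive step strictly lengthens can_to while it must stay a
-- member of the fixed collection.
def mkUniqA (fuel : Nat) (collection : List String) (candidate : String) (ignorcase : Bool) (postfix_ : Option String) : String :=
  let col_cmp := if ignorcase then collection.map PySem.Str.lower else collection
  let can_cmp := if ignorcase then PySem.Str.lower candidate else candidate
  let can_to := match postfix_ with
    | none => "_" ++ can_cmp
    | some p => can_cmp ++ p
  match fuel with
  | 0 => can_to
  | f + 1 => if can_to ∈ col_cmp then mkUniqA f col_cmp can_to ignorcase postfix_ else can_to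

def mkUniq_py (collection : List String) (candidate : String) (ignorcase : Bool) (postfix_ : Option String) : String :=
  mkUniqA (collection.length + 1) collection candidate ignorcase postfix_

-- ===== PORT B =====
-- The while loop of Source B, fueled the same way.
def mkUniqB (fuel : Nat) (col_cmp : List String) (can_to : String) (ignorcase : Bool) (postfix_ : Option String) : String :=
  match fuel with
  | 0 => can_to
  | f + 1 =>
    if can_to ∈ col_cmp then
      let can_cmp := if ignorcase then PySem.Str.lower can_to else can_to
      let can_to' := match postfix_ with
        | none => "_" ++ can_cmp
        | some p => can_cmp ++ p
      mkUniqB f col_cmp can_to' ignorcase postfix_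
    else can_to

def mkUniq_py_alt (collection : List String) (candidate : String) (ignorcase : Bool) (postfix_ : Option String) : String :=
  let col_cmp := if ignorcase then collection.map PySem.Str.lower else collection
  let can_cmp := if ignorcase then PySem.Str.lower candidate else candidate
  let can_to := match postfix_ with
    | none => "_" ++ can_cmp
    | some p => can_cmp ++ p
  mkUniqB (collection.length + 1) col_cmp can_to ignorcase postfix_

-- ===== PRECONDITION & SPEC =====
-- Pre_ excludes exactly the inputs on which Python A never returns (it recurses
-- until RecursionError): postfix "" with the compared candidate already present
-- in the compared collection; B's while loop also diverges there.
def Pre_mkUniq_py (collection : List String) (candidate : String) (ignorcase : Bool) (postfix_ : Option String) : Prop :=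
  ¬ (postfix_ = some "" ∧
     (if ignorcase then PySem.Str.lower candidate else candidate) ∈
     (if ignorcase then collection.map PySem.Str.lower else collection))
instance (collection : List String) (candidate : String) (ignorcase : Bool) (postfix_ : Option String) : Decidable (Pre_mkUniq_py collection candidate ignorcase postfix_) := by unfold Pre_mkUniq_py; infer_instance

def pvWitness_mkUniq_py : List String × String × Bool × Option String := (["_a", "_A"], "A", true, none)

def Spec_mkUniq_py (collection : List String) (candidate : String) (ignorcase : Bool) (postfix_ : Option String) (out : String) : Prop := out = mkUniq_py_alt collection candidate ignorcase postfix_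
instance (collection : List String) (candidate : String) (ignorcase : Bool) (postfix_ : Option String) (out : String) : Decidable (Spec_mkUniq_py collection candidate ignorcase postfix_ out) := by unfold Spec_mkUniq_py; infer_instance

-- ===== CLAIM (what is proved, stated in full; the proofs are below) =====
def Claim_equal_mkUniq_py : Prop := ∀ (collection : List String) (candidate : String) (ignorcase : Bool) (postfix_ : Option String), Dom_mkUniq_py collection candidate ignorcase postfix_ → Pre_mkUniq_py collection candidate ignorcase postfix_ → Spec_mkUniq_py collection candidate ignorcase postfix_ (mkUniq_py collection candidate ignorcase postfix_)

-- ===== LEMMAS AND PROOFS =====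
theorem pvLowerChar_idem (c : Char) : PySem.Chars.lowerChar (PySem.Chars.lowerChar c) = PySem.Chars.lowerChar c := by
  simp only [PySem.Chars.lowerChar, PySem.Chars.isupper]
  split_ifs with h1 h2
  · rw [Bool.and_eq_true, decide_eq_true_eq, decide_eq_true_eq] at h1 h2
    have hv1 : 65 ≤ c.toNat := by
      have h := h1.1; rw [Char.le_def, UInt32.le_iff_toNat_le] at h; exact h
    have hv2 : c.toNat ≤ 90 := by
      have h := h1.2; rw [Char.le_def, UInt32.le_iff_toNat_le] at h; exact h
    have hval : (Char.ofNat (c.toNat + 32)).toNat = c.toNat + 32 := by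
      unfold Char.ofNat
      rw [dif_pos]
      · rfl
      · exact Or.inl (by omega)
    have h2b : (Char.ofNat (c.toNat + 32)).toNat ≤ 90 := by
      have h := h2.2; rw [Char.le_def, UInt32.le_iff_toNat_le] at h; exact h
    rw [hval] at h2b
    omega
  · rfl
  · rfl

theorem pvLower_idem (s : String) : PySem.Str.lower (PySem.Str.lower s) = PySem.Str.lower s := by
  apply String.toList_inj.mp
  simp [PySem.Str.toList_lower, PySem.Chars.lower, List.map_map, Function.comp_def, pvLowerChar_idem]

theorem pvMap_lower_idem (l : List String) : (l.map PySem.Str.lower).map PySem.Str.lower = l.map PySem.Str.lower := by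
  simp [List.map_map, Function.comp_def, pvLower_idem]

-- main bridge: A's recursion equals B's loop at every fuel
theorem pvAB (fuel : Nat) : ∀ (collection : List String) (candidate : String) (ignorcase : Bool) (postfix_ : Option String),
    mkUniqA fuel collection candidate ignorcase postfix_ =
    mkUniqB fuel
      (if ignorcase then collection.map PySem.Str.lower else collection)
      (match postfix_ with
        | none => "_" ++ (if ignorcase then PySem.Str.lower candidate else candidate)
        | some p => (if ignorcase then PySem.Str.lower candidate else candidate) ++ p)
      ignorcase postfix_ := by
  induction fuel with
  | zero =>
    intro collection candidate ignorcase postfix_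
    simp only [mkUniqA, mkUniqB]
  | succ f ih =>
    intro collection candidate ignorcase postfix_
    simp only [mkUniqA, mkUniqB]
    set C := if ignorcase then collection.map PySem.Str.lower else collection with hC
    set T : String := match postfix_ with
      | none => "_" ++ (if ignorcase then PySem.Str.lower candidate else candidate)
      | some p => (if ignorcase then PySem.Str.lower candidate else candidate) ++ p with hT
    by_cases hmem : T ∈ C
    · simp only [hmem, if_true]
      rw [ih C T ignorcase postfix_]
      have hCC : (if ignorcase then C.map PySem.Str.lower else C) = C := by
        cases ignorcase with
        | false => simp [hC]
        | true => simp only [hC, if_true, pvMap_lower_idem]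
      rw [hCC]
    · simp only [hmem, if_false]

-- ===== VERDICT (by name: the statement is the Claim_ definition above) =====
theorem mkUniq_py_spec : Claim_equal_mkUniq_py := by
  intro collection candidate ignorcase postfix_ _ _
  show mkUniq_py collection candidate ignorcase postfix_ = mkUniq_py_alt collection candidate ignorcase postfix_
  unfold mkUniq_py mkUniq_py_alt
  exact pvAB (collection.length + 1) collection candidate ignorcase postfix_
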